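-- pv_equiv track=rewrite | github.com/mm-cr/coding-practice-challenges | practice_min_steps_make_piles_eq_height.py | solution
-- ===== SOURCE A (Python) =====
-- def solution(A):
--     A.sort(reverse=True)
--     counter: int = 0
--
--     for i in range(len(A)):
--         for j in range(i + 1, len(A)):
--             if A[j] < A[i]:
--                 A[i] -= A[i] - A[j]
--                 counter += 1
--
--     return counter
-- ===== SOURCE B (Python) =====
-- def solution(A):
--     s = sorted(A)
--     total = 0
--     rank = 0
--     prev = None
--     for v in s:
--         if prev is not None and v != prev:
--             rank += 1
--         total += rank
--         prev = v
--     return total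
-- ===== Notes on version B (the rewrite author's own statement) =====
-- stated objective: faster
-- what changed: Replaces the in-place nested O(n^2) index loops (each element repeatedly lowered to every smaller distinct value) by one sort followed by a single linear scan that assigns each element its distinct-smaller-value rank and sums the ranks.
import Mathlib
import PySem

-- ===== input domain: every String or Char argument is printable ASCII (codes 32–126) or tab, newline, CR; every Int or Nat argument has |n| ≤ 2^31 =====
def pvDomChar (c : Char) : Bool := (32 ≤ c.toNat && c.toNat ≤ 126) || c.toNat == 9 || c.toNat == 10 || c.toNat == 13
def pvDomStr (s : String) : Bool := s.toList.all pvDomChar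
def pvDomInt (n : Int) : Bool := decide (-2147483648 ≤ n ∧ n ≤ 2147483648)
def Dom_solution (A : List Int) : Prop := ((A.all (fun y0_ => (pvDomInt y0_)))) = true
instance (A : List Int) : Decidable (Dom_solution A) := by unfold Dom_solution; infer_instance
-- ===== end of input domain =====

-- B replaces A's in-place nested O(n^2) loops by sort + one linear rank-summing scan (O(n log n)).
-- A sorts and mutates its argument in place; the equivalence proved here is about the RETURN value only (B does not mutate).

-- ===== PORT A =====
-- inner-loop body: 'if A[j] < A[i]: A[i] -= A[i] - A[j]; counter += 1'
def pvInner (i : Int) (st : List Int × Int) (j : Int) : List Int × Int :=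
  let aj := PySem.List.pyGetD st.1 j 0
  let ai := PySem.List.pyGetD st.1 i 0
  if aj < ai then (PySem.List.pySetD st.1 i (ai - (ai - aj)), st.2 + 1) else st

def solution (A : List Int) : Int :=
  let A0 := PySem.List.sorted A (fun x => x) true
  let n := PySem.List.len A0
  ((PySem.List.pyRange 0 n 1).foldl
      (fun st i => (PySem.List.pyRange (i + 1) n 1).foldl (pvInner i) st) (A0, 0)).2

-- ===== PORT B =====
-- loop body: 'if prev is not None and v != prev: rank += 1; total += rank; prev = v'
def pvStep (st : Int × Int × Option Int) (v : Int) : Int × Int × Option Int :=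
  let rank : Int := match st.2.2 with
    | none => st.2.1
    | some p => if v ≠ p then st.2.1 + 1 else st.2.1
  (st.1 + rank, rank, some v)

def solution_alt (A : List Int) : Int :=
  let s := PySem.List.sorted A (fun x => x) false
  (s.foldl pvStep (0, 0, none)).1

-- ===== PRECONDITION & SPEC =====
def Spec_solution (A : List Int) (out : Int) : Prop := out = solution_alt A
instance (A : List Int) (out : Int) : Decidable (Spec_solution A out) := by unfold Spec_solution; infer_instance

-- ===== CLAIM (what is proved, stated in full; the proofs are below) =====
def Claim_equal_solution : Prop := ∀ (A : List Int), Dom_solution A → Spec_solution A (solution A)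

-- ===== LEMMAS AND PROOFS =====

-- the evolution of (A[i], counter) over A's inner loop, as a scan of the suffix
def pvScan : Int → List Int → Int × Int
  | v, [] => (v, 0)
  | v, u :: t => if u < v then ((pvScan u t).1, (pvScan u t).2 + 1) else pvScan v t

-- total counter of A's outer loop on the (descending) sorted list
def pvT : List Int → Int
  | [] => 0
  | x :: t => (pvScan x t).2 + pvT t

-- the common quantity: sum over elements of the number of distinct strictly smaller values
def pvG (l : List Int) : Int :=
  (l.map (fun x => ((l.toFinset.filter (fun y => y < x)).card : Int))).sum

lemma pvScan_snd (v : Int) (t : List Int) (hp : t.Pairwise (fun a b => b ≤ a))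
    (hv : ∀ y ∈ t, y ≤ v) :
    (pvScan v t).2 = ((t.toFinset.filter (fun y => y < v)).card : Int) := by
  induction t generalizing v with
  | nil => simp [pvScan]
  | cons u t ih =>
    rw [List.pairwise_cons] at hp
    obtain ⟨hu, hp'⟩ := hp
    by_cases h : u < v
    · have h1 : (u :: t).toFinset.filter (fun y => y < v)
          = insert u (t.toFinset.filter (fun y => y < u)) := by
        ext y
        simp only [List.toFinset_cons, Finset.mem_filter, Finset.mem_insert, List.mem_toFinset]
        constructor
        · rintro ⟨hy | hy, hlt⟩
          · exact Or.inl hy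
          · rcases eq_or_lt_of_le (hu y hy) with he | hl
            · exact Or.inl he
            · exact Or.inr ⟨hy, hl⟩
        · rintro (rfl | ⟨hy, hlt⟩)
          · exact ⟨Or.inl rfl, h⟩
          · exact ⟨Or.inr hy, hlt.trans h⟩
      have h2 : u ∉ t.toFinset.filter (fun y => y < u) := by simp
      have hv' : ∀ y ∈ t, y ≤ u := fun y hy => hu y hy
      simp only [pvScan, if_pos h, ih u hp' hv', h1, Finset.card_insert_of_notMem h2]
      push_cast
      ring
    · have he : u = v := le_antisymm (hv u (List.mem_cons_self ..)) (not_lt.mp h)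
      subst he
      have h1 : (u :: t).toFinset.filter (fun y => y < u)
          = t.toFinset.filter (fun y => y < u) := by
        ext y
        simp only [List.toFinset_cons, Finset.mem_filter, Finset.mem_insert, List.mem_toFinset]
        constructor
        · rintro ⟨hy | hy, hlt⟩
          · omega
          · exact ⟨hy, hlt⟩
        · rintro ⟨hy, hlt⟩
          exact ⟨Or.inr hy, hlt⟩
      have hv' : ∀ y ∈ t, y ≤ u := fun y hy => hu y hy
      simp only [pvScan, if_neg h, ih u hp' hv', h1]

lemma pvT_eq (l : List Int) (hp : l.Pairwise (fun a b => b ≤ a)) : pvT l = pvG l := by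
  induction l with
  | nil => simp [pvT, pvG]
  | cons x t ih =>
    rw [List.pairwise_cons] at hp
    obtain ⟨hx, hp'⟩ := hp
    have hsc := pvScan_snd x t hp' hx
    have hfx : (x :: t).toFinset.filter (fun y => y < x) = t.toFinset.filter (fun y => y < x) := by
      ext y
      simp only [List.toFinset_cons, Finset.mem_insert, Finset.mem_filter, List.mem_toFinset]
      constructor
      · rintro ⟨rfl | hy, hlt⟩
        · omega
        · exact ⟨hy, hlt⟩
      · rintro ⟨hy, hlt⟩
        exact ⟨Or.inr hy, hlt⟩
    have hmap : t.map (fun v => (((x :: t).toFinset.filter (fun y => y < v)).card : Int))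
        = t.map (fun v => ((t.toFinset.filter (fun y => y < v)).card : Int)) := by
      apply List.map_congr_left
      intro v hv
      have hset : (x :: t).toFinset.filter (fun y => y < v) = t.toFinset.filter (fun y => y < v) := by
        ext y
        simp only [List.toFinset_cons, Finset.mem_insert, Finset.mem_filter, List.mem_toFinset]
        constructor
        · rintro ⟨rfl | hy, hlt⟩
          · exact absurd hlt (not_lt.mpr (hx v hv))
          · exact ⟨hy, hlt⟩
        · rintro ⟨hy, hlt⟩
          exact ⟨Or.inr hy, hlt⟩
      rw [hset]
    unfold pvG
    rw [List.map_cons, List.sum_cons, hfx, hmap]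
    unfold pvG at ih
    simp only [pvT, hsc, ih hp']

lemma pvG_perm (l1 l2 : List Int) (h : l1.Perm l2) : pvG l1 = pvG l2 := by
  unfold pvG
  rw [List.toFinset_eq_of_perm l1 l2 h]
  exact List.Perm.sum_eq (h.map _)

lemma pvInner_fold (N i : Nat) (hi : i < N) :
    ∀ (m j : Nat) (l : List Int) (c : Int), l.length = N → i < j → j + m = N →
      (PySem.List.pyRange (j : Int) (N : Int) 1).foldl (pvInner (i : Int)) (l, c) =
        (l.set i (pvScan (l.getD i 0) (l.drop j)).1,
         c + (pvScan (l.getD i 0) (l.drop j)).2) := by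
  intro m
  induction m with
  | zero =>
    intro j l c hlen hij hjm
    have hj : j = N := by omega
    rw [hj, PySem.List.pyRange_one_eq_nil (le_refl _), List.drop_of_length_le (by omega)]
    simp only [List.foldl_nil, pvScan]
    rw [List.getD_eq_getElem l 0 (by omega), List.set_getElem_self]
    simp
  | succ m ih =>
    intro j l c hlen hij hjm
    have hjN : j < N := by omega
    have hjl : j < l.length := by omega
    have hil : i < l.length := by omega
    rw [PySem.List.pyRange_one_cons (by exact_mod_cast hjN), List.foldl_cons]
    have hgi : PySem.List.pyGetD l (i : Int) 0 = l[i] := by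
      rw [PySem.List.pyGetD_natCast, List.getD_eq_getElem l 0 hil]
    have hgj : PySem.List.pyGetD l (j : Int) 0 = l[j] := by
      rw [PySem.List.pyGetD_natCast, List.getD_eq_getElem l 0 hjl]
    have hdrop : l.drop j = l[j] :: l.drop (j + 1) := List.drop_eq_getElem_cons hjl
    have hstep : ((j : Int) + 1) = ((j + 1 : Nat) : Int) := by push_cast; ring
    by_cases h : l[j] < l[i]
    · have hbody : pvInner (i : Int) (l, c) (j : Int) = (l.set i l[j], c + 1) := by
        simp only [pvInner, hgi, hgj, if_pos h, PySem.List.pySetD_natCast]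
        congr 2
        ring
      rw [hbody, hstep, ih (j + 1) (l.set i l[j]) (c + 1) (by simp [hlen]) (by omega) (by omega)]
      rw [List.set_set, List.drop_set_of_lt (by omega)]
      rw [List.getD_eq_getElem (l.set i l[j]) 0 (by simpa using hil), List.getElem_set_self (by simpa using hil)]
      rw [hdrop, List.getD_eq_getElem l 0 hil]
      simp only [pvScan, if_pos h, Prod.mk.injEq]
      constructor
      · trivial
      · ring
    · have hbody : pvInner (i : Int) (l, c) (j : Int) = (l, c) := by
        simp only [pvInner, hgi, hgj, if_neg h]
      rw [hbody, hstep, ih (j + 1) l c hlen (by omega) (by omega), hdrop,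
        List.getD_eq_getElem l 0 hil]
      simp only [pvScan, if_neg h]

lemma pvOuter_fold (A0 : List Int) (N : Nat) (hN : A0.length = N) :
    ∀ (m i : Nat) (l : List Int) (c : Int), l.length = N → i + m = N → l.drop i = A0.drop i →
      (((PySem.List.pyRange (i : Int) (N : Int) 1).foldl
          (fun st k => (PySem.List.pyRange (k + 1) (N : Int) 1).foldl (pvInner k) st)
          (l, c))).2 = c + pvT (A0.drop i) := by
  intro m
  induction m with
  | zero =>
    intro i l c hlen him hdropEq
    have hiN : i = N := by omega
    rw [hiN, PySem.List.pyRange_one_eq_nil (le_refl _), List.drop_of_length_le (by omega)]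
    simp [pvT]
  | succ m ih =>
    intro i l c hlen him hdropEq
    have hiN : i < N := by omega
    have hil : i < l.length := by omega
    have hiA : i < A0.length := by omega
    rw [PySem.List.pyRange_one_cons (by exact_mod_cast hiN), List.foldl_cons]
    have hstep : ((i : Int) + 1) = ((i + 1 : Nat) : Int) := by push_cast; ring
    have hinner := pvInner_fold N i hiN m (i + 1) l c hlen (by omega) (by omega)
    have hd1 : l.drop i = l[i] :: l.drop (i + 1) := List.drop_eq_getElem_cons hil
    have hd2 : A0.drop i = A0[i] :: A0.drop (i + 1) := List.drop_eq_getElem_cons hiA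
    have hct : l[i] = A0[i] ∧ l.drop (i + 1) = A0.drop (i + 1) := by
      have h2 := hdropEq
      rw [hd1, hd2] at h2
      exact ⟨by injection h2, by injection h2⟩
    have hgd : l.getD i 0 = A0[i] := by rw [List.getD_eq_getElem l 0 hil, hct.1]
    simp only [hstep, hinner]
    rw [ih (i + 1) (l.set i (pvScan (l.getD i 0) (l.drop (i + 1))).1)
        (c + (pvScan (l.getD i 0) (l.drop (i + 1))).2) (by simp [hlen]) (by omega)
        (by rw [List.drop_set_of_lt (by omega)]; exact hct.2)]
    rw [hd2]
    simp only [pvT]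
    rw [hgd, hct.2]
    ring

lemma pvB_fold (t : List Int) : ∀ (c r p : Int), t.Pairwise (· ≤ ·) → (∀ y ∈ t, p ≤ y) →
    (t.foldl pvStep (c, r, some p)).1 =
      c + (t.map (fun v => r + ((t.toFinset.filter (fun y => p < y ∧ y ≤ v)).card : Int))).sum := by
  induction t with
  | nil => intro c r p _ _; simp
  | cons u t ih =>
    intro c r p hp hlb
    rw [List.pairwise_cons] at hp
    obtain ⟨hu, hp'⟩ := hp
    have hpu : p ≤ u := hlb u (List.mem_cons_self ..)
    by_cases h : p < u
    · have hstep : pvStep (c, r, some p) u = (c + (r + 1), r + 1, some u) := by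
        simp only [pvStep]
        rw [if_pos (by omega : u ≠ p)]
      have h1 : (u :: t).toFinset.filter (fun y => p < y ∧ y ≤ u) = {u} := by
        ext y
        simp only [List.toFinset_cons, Finset.mem_insert, Finset.mem_filter, List.mem_toFinset,
          Finset.mem_singleton]
        constructor
        · rintro ⟨rfl | hy, h2, h3⟩
          · rfl
          · exact le_antisymm h3 (hu y hy)
        · rintro rfl
          exact ⟨Or.inl rfl, h, le_refl _⟩
      have hmap : t.map (fun v => r + (((u :: t).toFinset.filter (fun y => p < y ∧ y ≤ v)).card : Int))
          = t.map (fun v => (r + 1) + ((t.toFinset.filter (fun y => u < y ∧ y ≤ v)).card : Int)) := by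
        apply List.map_congr_left
        intro v hv
        have h2 : (u :: t).toFinset.filter (fun y => p < y ∧ y ≤ v)
            = insert u (t.toFinset.filter (fun y => u < y ∧ y ≤ v)) := by
          ext y
          simp only [List.toFinset_cons, Finset.mem_insert, Finset.mem_filter, List.mem_toFinset]
          constructor
          · rintro ⟨rfl | hy, h3, h4⟩
            · exact Or.inl rfl
            · rcases eq_or_lt_of_le (hu y hy) with he | hl
              · exact Or.inl he.symm
              · exact Or.inr ⟨hy, hl, h4⟩
          · rintro (rfl | ⟨hy, h3, h4⟩)
            · exact ⟨Or.inl rfl, h, hu v hv⟩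
            · exact ⟨Or.inr hy, h.trans h3, h4⟩
        rw [h2, Finset.card_insert_of_notMem (by simp)]
        push_cast
        ring
      rw [List.foldl_cons, hstep, ih (c + (r + 1)) (r + 1) u hp' hu,
        List.map_cons, List.sum_cons, h1, hmap]
      simp only [Finset.card_singleton]
      push_cast
      ring
    · have he : u = p := by omega
      subst he
      have hstep : pvStep (c, r, some u) u = (c + r, r, some u) := by
        simp [pvStep]
      have h1 : (u :: t).toFinset.filter (fun y => u < y ∧ y ≤ u) = ∅ := by
        ext y
        simp only [List.toFinset_cons, Finset.mem_insert, Finset.mem_filter, List.mem_toFinset,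
          Finset.notMem_empty, iff_false]
        rintro ⟨_, h2, h3⟩
        omega
      have hmap : t.map (fun v => r + (((u :: t).toFinset.filter (fun y => u < y ∧ y ≤ v)).card : Int))
          = t.map (fun v => r + ((t.toFinset.filter (fun y => u < y ∧ y ≤ v)).card : Int)) := by
        apply List.map_congr_left
        intro v hv
        have h2 : (u :: t).toFinset.filter (fun y => u < y ∧ y ≤ v)
            = t.toFinset.filter (fun y => u < y ∧ y ≤ v) := by
          ext y
          simp only [List.toFinset_cons, Finset.mem_insert, Finset.mem_filter, List.mem_toFinset]
          constructor
          · rintro ⟨rfl | hy, h3, h4⟩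
            · omega
            · exact ⟨hy, h3, h4⟩
          · rintro ⟨hy, h3, h4⟩
            exact ⟨Or.inr hy, h3, h4⟩
        rw [h2]
      rw [List.foldl_cons, hstep, ih (c + r) r u hp' hu, List.map_cons, List.sum_cons, h1, hmap]
      simp only [Finset.card_empty]
      push_cast
      ring

lemma pvB_eq_G (s : List Int) (hp : s.Pairwise (· ≤ ·)) :
    (s.foldl pvStep (0, 0, none)).1 = pvG s := by
  cases s with
  | nil => simp [pvG]
  | cons v0 t =>
    rw [List.pairwise_cons] at hp
    obtain ⟨h0, hp'⟩ := hp
    have hstep : pvStep (0, 0, none) v0 = (0, 0, some v0) := by simp [pvStep]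
    rw [List.foldl_cons, hstep, pvB_fold t 0 0 v0 hp' h0]
    unfold pvG
    rw [List.map_cons, List.sum_cons]
    have hz : ((v0 :: t).toFinset.filter (fun y => y < v0)) = ∅ := by
      ext y
      simp only [List.toFinset_cons, Finset.mem_insert, Finset.mem_filter, List.mem_toFinset,
        Finset.notMem_empty, iff_false]
      rintro ⟨rfl | hy, hlt⟩
      · omega
      · exact absurd hlt (not_lt.mpr (h0 y hy))
    have hmap : t.map (fun v => (0 : Int) + ((t.toFinset.filter (fun y => v0 < y ∧ y ≤ v)).card : Int))
        = t.map (fun v => (((v0 :: t).toFinset.filter (fun y => y < v)).card : Int)) := by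
      apply List.map_congr_left
      intro v hv
      have hv0 : v0 ≤ v := h0 v hv
      rcases eq_or_lt_of_le hv0 with rfl | hlt
      · have e1 : t.toFinset.filter (fun y => v0 < y ∧ y ≤ v0) = ∅ := by
          ext y
          simp only [Finset.mem_filter, List.mem_toFinset, Finset.notMem_empty, iff_false]
          rintro ⟨_, h2, h3⟩
          omega
        have e2 : (v0 :: t).toFinset.filter (fun y => y < v0) = ∅ := hz
        rw [e1, e2]
        simp
      · have e1 : t.toFinset.filter (fun y => v0 < y ∧ y ≤ v)
            = insert v (t.toFinset.filter (fun y => v0 < y ∧ y < v)) := by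
          ext y
          simp only [Finset.mem_filter, List.mem_toFinset, Finset.mem_insert]
          constructor
          · rintro ⟨hy, h2, h3⟩
            rcases eq_or_lt_of_le h3 with he | hl
            · exact Or.inl he
            · exact Or.inr ⟨hy, h2, hl⟩
          · rintro (rfl | ⟨hy, h2, h3⟩)
            · exact ⟨hv, hlt, le_refl _⟩
            · exact ⟨hy, h2, le_of_lt h3⟩
        have e2 : (v0 :: t).toFinset.filter (fun y => y < v)
            = insert v0 (t.toFinset.filter (fun y => v0 < y ∧ y < v)) := by
          ext y
          simp only [List.toFinset_cons, Finset.mem_insert, Finset.mem_filter, List.mem_toFinset]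
          constructor
          · rintro ⟨rfl | hy, hylt⟩
            · exact Or.inl rfl
            · rcases eq_or_lt_of_le (h0 y hy) with he | hl
              · exact Or.inl he.symm
              · exact Or.inr ⟨hy, hl, hylt⟩
          · rintro (rfl | ⟨hy, h2, h3⟩)
            · exact ⟨Or.inl rfl, hlt⟩
            · exact ⟨Or.inr hy, h3⟩
        rw [e1, e2, Finset.card_insert_of_notMem (by simp), Finset.card_insert_of_notMem (by simp)]
        push_cast
        ring
    rw [hz, hmap]
    simp

lemma solution_eq_T (A : List Int) :
    solution A = pvT (PySem.List.sorted A (fun x => x) true) := by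
  unfold solution
  simp only [PySem.List.len_eq]
  have h := pvOuter_fold (PySem.List.sorted A (fun x => x) true)
    (PySem.List.sorted A (fun x => x) true).length rfl
    (PySem.List.sorted A (fun x => x) true).length 0
    (PySem.List.sorted A (fun x => x) true) 0 rfl (by omega) rfl
  simpa using h

-- ===== VERDICT (by name: the statement is the Claim_ definition above) =====
theorem solution_spec : Claim_equal_solution := by
  intro A _
  unfold Spec_solution solution_alt
  rw [solution_eq_T, pvT_eq _ (PySem.List.sorted_pairwise_rev A (fun x => x)),
    pvG_perm _ _ ((PySem.List.sorted_perm A (fun x => x) true).trans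
      (PySem.List.sorted_perm A (fun x => x) false).symm),
    pvB_eq_G _ (PySem.List.sorted_pairwise A (fun x => x))]
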